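-- pv_equiv track=rewrite | github.com/thibault883/5WWIPython | 10-strings/alfabetische woorden.py | positie_laagste_ascii
-- ===== SOURCE A (Python) =====
-- def positie_laagste_ascii(woord):
--     vorig = woord[0]
--     stap = 0
--     for i in range(len(woord)):
--         if ord(woord[i]) < ord(vorig):
--             vorig = woord[i]
--             stap = i
--
--     return stap
-- ===== SOURCE B (Python) =====
-- def positie_laagste_ascii(woord):
--     return woord.index(min(woord))
-- ===== Notes on version B (the rewrite author's own statement) =====
-- stated objective: simpler
-- what changed: Replaces A's single running-minimum scan (tracking vorig/stap through an indexed loop) with two library passes: min(woord) finds the smallest character, then woord.index locates its first occurrence.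
import Mathlib
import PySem

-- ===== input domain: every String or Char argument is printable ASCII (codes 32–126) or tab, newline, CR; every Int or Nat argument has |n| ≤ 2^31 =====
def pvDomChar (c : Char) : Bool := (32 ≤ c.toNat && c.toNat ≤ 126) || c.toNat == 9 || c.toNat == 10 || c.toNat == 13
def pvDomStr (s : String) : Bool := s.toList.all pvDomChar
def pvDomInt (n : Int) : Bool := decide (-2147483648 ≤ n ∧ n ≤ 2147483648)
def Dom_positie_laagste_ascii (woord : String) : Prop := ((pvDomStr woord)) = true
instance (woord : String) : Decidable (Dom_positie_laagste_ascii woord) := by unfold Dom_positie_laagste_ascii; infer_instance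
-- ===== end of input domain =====

-- B replaces A's running-minimum indexed loop by min(woord) followed by woord.index(...): simpler decomposition, same O(n) cost.

-- ===== PORT A =====
def positie_laagste_ascii (woord : String) : Int :=
  let cs := woord.toList
  match PySem.List.pyGet? cs 0 with        -- vorig = woord[0]  (none = IndexError, excluded by Pre_)
  | none => 0
  | some v0 =>
    let st := (PySem.List.pyRange 0 (cs.length : Int) 1).foldl
      (fun (st : Char × Int) i =>
        match PySem.List.pyGet? cs i with
        | none => st
        | some c => if c.toNat < st.1.toNat then (c, i) else st)
      (v0, 0)
    st.2

-- ===== PORT B =====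
def positie_laagste_ascii_alt (woord : String) : Int :=
  match PySem.List.min? woord.toList (fun c => c) with   -- min(woord)  (none = ValueError, excluded by Pre_)
  | none => 0
  | some m =>
    match PySem.List.index? woord.toList m with          -- woord.index(...)
    | none => 0
    | some k => (k : Int)

-- ===== PRECONDITION & SPEC =====
-- A raises IndexError (woord[0]) and B raises ValueError (min of empty) on the empty string; nothing else is excluded.
def Pre_positie_laagste_ascii (woord : String) : Prop := woord ≠ ""
instance (woord : String) : Decidable (Pre_positie_laagste_ascii woord) := by unfold Pre_positie_laagste_ascii; infer_instance
def pvWitness_positie_laagste_ascii : String := "abA"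
def Spec_positie_laagste_ascii (woord : String) (out : Int) : Prop := out = positie_laagste_ascii_alt woord
instance (woord : String) (out : Int) : Decidable (Spec_positie_laagste_ascii woord out) := by unfold Spec_positie_laagste_ascii; infer_instance

-- ===== CLAIM (what is proved, stated in full; the proofs are below) =====
def Claim_equal_positie_laagste_ascii : Prop := ∀ (woord : String), Dom_positie_laagste_ascii woord → Pre_positie_laagste_ascii woord → Spec_positie_laagste_ascii woord (positie_laagste_ascii woord)

-- ===== LEMMAS AND PROOFS =====

-- A's loop body, abstracted over the character list.
def pvStepA (cs : List Char) (st : Char × Int) (i : Int) : Char × Int :=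
  match PySem.List.pyGet? cs i with
  | none => st
  | some c => if c.toNat < st.1.toNat then (c, i) else st

lemma pvCharLe (a b : Char) : (a ≤ b) ↔ a.toNat ≤ b.toNat := by
  simp [Char.le_def, UInt32.le_iff_toNat_le]

lemma pvCharEq (a b : Char) (h : a.toNat = b.toNat) : a = b :=
  Char.ext (UInt32.toNat_inj.mp h)

-- first-occurrence index: if no earlier element equals xs[k], index? finds k
lemma pvIndex_first {α : Type} [BEq α] [LawfulBEq α] (xs : List α) (k : Nat)
    (hk : k < xs.length) (hfirst : ∀ j, (hj : j < k) → xs[j]'(by omega) ≠ xs[k]) :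
    PySem.List.index? xs xs[k] = some k := by
  induction xs generalizing k with
  | nil => simp at hk
  | cons x t ih =>
    cases k with
    | zero => simpa using PySem.List.index?_cons_self x t
    | succ k =>
      have hx : x ≠ (x :: t)[k+1] := hfirst 0 (Nat.succ_pos k)
      rw [PySem.List.index?_cons_of_ne (v := (x :: t)[k+1]) (xs := t) hx]
      have ht : t[k]'(by simpa using hk) = (x :: t)[k+1] := by simp
      have := ih k (by simpa using hk) (fun j hj => by
        have := hfirst (j+1) (by omega)
        simpa using this)
      rw [← ht, this]
      simp

-- Invariant of A's fold: after scanning indices 0..n, the state is (cs[k], k) where k is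
-- the first index of the minimum of cs[0..n).
lemma pvFoldA_inv (cs : List Char) (hlen : 0 < cs.length) (n : Nat) (h1 : 1 ≤ n) (h2 : n ≤ cs.length) :
    ∃ k : Nat, ∃ hk : k < n,
      (PySem.List.pyRange 0 (n : Int) 1).foldl (pvStepA cs) (cs[0]'hlen, 0)
        = (cs[k]'(by omega), (k : Int)) ∧
      (∀ j, (hj : j < n) → (cs[k]'(by omega)).toNat ≤ (cs[j]'(by omega)).toNat) ∧
      (∀ j, (hj : j < k) → (cs[k]'(by omega)).toNat < (cs[j]'(by omega)).toNat) := by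
  induction n with
  | zero => omega
  | succ n ih =>
    by_cases hn : n = 0
    · subst hn
      refine ⟨0, by omega, ?_, ?_, ?_⟩
      · have hr : PySem.List.pyRange 0 ((1:Nat) : Int) 1 = [0] := by
          simpa using PySem.List.pyRange_one_singleton (a := 0)
        rw [hr]
        simp only [List.foldl, pvStepA]
        rw [PySem.List.pyGet?_zero]
        simp [List.getElem?_eq_getElem (by omega : 0 < cs.length)]
      · intro j hj; interval_cases j; omega
      · intro j hj; omega
    · obtain ⟨k, hk, heq, hmin, hfirst⟩ := ih (by omega) (by omega)
      have hr : PySem.List.pyRange 0 ((n+1 : Nat) : Int) 1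
          = PySem.List.pyRange 0 (n : Nat) 1 ++ [(n : Int)] := by
        have := PySem.List.pyRange_one_succ_right (a := 0) (b := (n : Int)) (by positivity)
        push_cast
        rw [this]
      rw [hr]; simp only [List.foldl_append, List.foldl]; rw [heq]
      have hget : PySem.List.pyGet? cs ((n : Nat) : Int) = some (cs[n]'(by omega)) := by
        rw [PySem.List.pyGet?_natCast]
        exact List.getElem?_eq_getElem (by omega)
      by_cases hlt : (cs[n]'(by omega)).toNat < (cs[k]'(by omega)).toNat
      · refine ⟨n, by omega, ?_, ?_, ?_⟩
        · simp only [pvStepA, hget, hlt, if_true]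
        · intro j hj
          rcases Nat.lt_succ_iff_lt_or_eq.mp hj with h | h
          · exact le_trans (le_of_lt hlt) (hmin j h)
          · subst h; omega
        · intro j hj
          exact lt_of_lt_of_le hlt (hmin j hj)
      · refine ⟨k, by omega, ?_, ?_, ?_⟩
        · simp only [pvStepA, hget, hlt, if_false]
        · intro j hj
          rcases Nat.lt_succ_iff_lt_or_eq.mp hj with h | h
          · exact hmin j h
          · subst h; omega
        · exact hfirst

theorem positie_laagste_ascii_spec : Claim_equal_positie_laagste_ascii := by
  intro woord _ hpre
  unfold Spec_positie_laagste_ascii positie_laagste_ascii positie_laagste_ascii_alt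
  have hcs : woord.toList ≠ [] := by
    intro h
    exact hpre (by rwa [← String.toList_eq_nil_iff])
  set cs := woord.toList with hcsdef
  have hlen : 0 < cs.length := List.length_pos_iff.mpr hcs
  have hget0 : PySem.List.pyGet? cs 0 = some (cs[0]'hlen) := by
    rw [PySem.List.pyGet?_zero]
    exact List.getElem?_eq_getElem hlen
  obtain ⟨k, hk, heq, hmin, hfirst⟩ := pvFoldA_inv cs hlen cs.length hlen le_rfl
  have hstep : (fun (st : Char × Int) i =>
      match PySem.List.pyGet? cs i with
      | none => st
      | some c => if c.toNat < st.1.toNat then (c, i) else st) = pvStepA cs := rfl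
  -- the minimum returned by B
  obtain ⟨m, hm⟩ : ∃ m, PySem.List.min? cs (fun c => c) = some m := by
    obtain ⟨x, t, hxt⟩ := List.exists_cons_of_ne_nil hcs
    exact ⟨_, by rw [hxt]; exact PySem.List.min?_id_cons x t⟩
  have hmmem : m ∈ cs := PySem.List.min?_mem hm
  have hmmin : ∀ y ∈ cs, m ≤ y := PySem.List.min?_isMin hm
  have hmk : m = cs[k]'(by omega) := by
    obtain ⟨j, hj, hjm⟩ := List.mem_iff_getElem.mp hmmem
    apply pvCharEq
    have h1 : m.toNat ≤ (cs[k]'(by omega)).toNat :=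
      (pvCharLe _ _).mp (hmmin _ (List.getElem_mem _))
    have h2 : (cs[k]'(by omega)).toNat ≤ m.toNat := by
      rw [← hjm]; exact hmin j hj
    omega
  have hidx : PySem.List.index? cs m = some k := by
    rw [hmk]
    exact pvIndex_first cs k (by omega) (fun j hj => by
      have := hfirst j hj; intro hcon; rw [hcon] at this; omega)
  simp only [hget0, hstep, hm, hidx, heq]
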